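-- pv_equiv track=rewrite | github.com/aratik711/grokking-dynamic-programming-patterns | unbounded-knapsack/min-ribbon-cut/bottom-up.py | count_ribbon_pieces
-- ===== SOURCE A (Python) =====
-- import math
--
-- def count_ribbon_pieces(ribbonLengths, total):
--     n = len(ribbonLengths)
--     dp = [ [-math.inf for x in range(total + 1)]for y in range(n)]
--     for i in range(n):
--         dp[i][0] = 0
--     for i in range(n):
--         for t in range(1, total+1):
--             if i > 0:
--                 dp[i][t] = dp[i-1][t]
--             if t >= ribbonLengths[i] and dp[i][t-ribbonLengths[i]] != -math.inf:
--                 dp[i][t] = max(dp[i][t], dp[i][t-ribbonLengths[i]] + 1)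
--     return -1 if dp[n-1][total] == -math.inf else dp[n-1][total]
-- ===== SOURCE B (Python) =====
-- def count_ribbon_pieces(ribbonLengths, total):
--     dp = [None] * (total + 1)
--     dp[0] = 0
--     for t in range(1, total + 1):
--         for length in ribbonLengths:
--             if length <= t:
--                 prev = dp[t - length]
--                 if prev is not None:
--                     if dp[t] is None or dp[t] < prev + 1:
--                         dp[t] = prev + 1
--     return -1 if dp[total] is None else dp[total]
-- ===== Notes on version B (the rewrite author's own statement) =====
-- stated objective: simpler
-- what changed: Replaces A's n-by-(total+1) table (one row per ribbon length, each row copied from the previous one) by a single 1D array filled in one outer pass over amounts t=1..total with an inner scan of the lengths, using None instead of -inf; O(n*total) time like A but O(total) space and no row-copy pass.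
-- outside the precondition, e.g. on count_ribbon_pieces([3, 0], 6): A returns 3, B returns 4
import Mathlib
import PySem

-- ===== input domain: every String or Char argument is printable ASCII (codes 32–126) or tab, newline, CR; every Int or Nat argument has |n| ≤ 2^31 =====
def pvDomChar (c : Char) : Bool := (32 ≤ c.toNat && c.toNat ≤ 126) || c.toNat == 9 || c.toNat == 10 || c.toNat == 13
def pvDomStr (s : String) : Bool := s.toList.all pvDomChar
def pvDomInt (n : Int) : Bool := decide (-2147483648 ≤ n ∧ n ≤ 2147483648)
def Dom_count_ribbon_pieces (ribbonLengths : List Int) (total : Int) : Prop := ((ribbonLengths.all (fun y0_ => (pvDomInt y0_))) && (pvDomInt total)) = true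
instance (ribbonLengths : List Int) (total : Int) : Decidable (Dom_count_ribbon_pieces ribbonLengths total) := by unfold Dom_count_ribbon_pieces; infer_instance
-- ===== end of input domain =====

-- B replaces A's n×(total+1) table (a row per length, each row copied from the previous) by a single
-- 1D array filled in one outer pass over amounts with an inner scan of the lengths: same O(n·total)
-- time, O(total) space instead of O(n·total), and no row-copy pass (objective: simpler).

-- ===== PORT A =====
-- -inf is modelled as `none : Option Int` (the float -math.inf is only a sentinel in A).
-- pvCellA dp i t = dp[i][t]; an out-of-range read (Python IndexError) collapses to none — such
-- reads happen only outside Pre_count_ribbon_pieces.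
def pvCellA (dp : List (List (Option Int))) (i : Nat) (t : Int) : Option Int :=
  (PySem.List.pyGet? (dp.getD i []) t).getD none

-- dp[i][t] = v  (the written index t is always ≥ 1, from range(1, total+1), or the literal 0)
def pvSetCellA (dp : List (List (Option Int))) (i : Nat) (t : Int) (v : Option Int) : List (List (Option Int)) :=
  dp.set i ((dp.getD i []).set t.toNat v)

-- Python max where either side may be -inf (= none)
def pvOptMax (a b : Option Int) : Option Int :=
  match a, b with
  | none, b => b
  | some x, none => some x
  | some x, some y => some (max x y)

-- the body of A's innermost loop, for given i and t
def pvBodyA (ribbonLengths : List Int) (i : Nat) (dp : List (List (Option Int))) (t : Int) : List (List (Option Int)) :=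
  let dp' := if 0 < i then pvSetCellA dp i t (pvCellA dp (i - 1) t) else dp
  if (PySem.List.pyGet? ribbonLengths (Int.ofNat i)).getD 0 ≤ t ∧
      pvCellA dp' i (t - (PySem.List.pyGet? ribbonLengths (Int.ofNat i)).getD 0) ≠ none then
    pvSetCellA dp' i t (pvOptMax (pvCellA dp' i t)
      ((pvCellA dp' i (t - (PySem.List.pyGet? ribbonLengths (Int.ofNat i)).getD 0)).map (· + 1)))
  else dp'

def count_ribbon_pieces (ribbonLengths : List Int) (total : Int) : Int :=
  let n := ribbonLengths.length
  let dp0 : List (List (Option Int)) :=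
    List.replicate n (List.replicate (total + 1).toNat (none : Option Int))
  let dp1 := (List.range n).foldl (fun dp i => pvSetCellA dp i 0 (some 0)) dp0
  let dp2 := (List.range n).foldl (fun dp i =>
    (PySem.List.pyRange 1 (total + 1) 1).foldl (fun dp t => pvBodyA ribbonLengths i dp t) dp) dp1
  match pvCellA dp2 (n - 1) total with
  | none => -1
  | some v => v

-- ===== PORT B =====
-- the body of B's inner loop: one candidate length L at amount t
def pvBodyB (t : Int) (dp : List (Option Int)) (L : Int) : List (Option Int) :=
  if L ≤ t then
    match (PySem.List.pyGet? dp (t - L)).getD none with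
    | none => dp
    | some prev =>
      match (PySem.List.pyGet? dp t).getD none with
      | none => dp.set t.toNat (some (prev + 1))
      | some cur => if cur < prev + 1 then dp.set t.toNat (some (prev + 1)) else dp
  else dp

def count_ribbon_pieces_alt (ribbonLengths : List Int) (total : Int) : Int :=
  let dp0 : List (Option Int) :=
    (List.replicate (total + 1).toNat (none : Option Int)).set 0 (some 0)
  let dp := (PySem.List.pyRange 1 (total + 1) 1).foldl (fun dp t =>
    ribbonLengths.foldl (fun dp L => pvBodyB t dp L) dp) dp0
  match (PySem.List.pyGet? dp total).getD none with
  | none => -1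
  | some v => v

-- ===== PRECONDITION & SPEC =====
-- Pre_ excludes (a) inputs where Python A raises IndexError: an empty list, a negative total, or a
-- negative length together with total ≥ 1; and (b) lists containing a zero length with total ≥ 1,
-- where A still returns but its self-referential update dp[i][t] = dp[i][t-0]+1 reads the cell being
-- written, so both A's and B's values there are accidents of evaluation order (see the cite).
def Pre_count_ribbon_pieces (ribbonLengths : List Int) (total : Int) : Prop :=
  ribbonLengths ≠ [] ∧ 0 ≤ total ∧ (total = 0 ∨ ∀ L ∈ ribbonLengths, 1 ≤ L)
instance (ribbonLengths : List Int) (total : Int) : Decidable (Pre_count_ribbon_pieces ribbonLengths total) := by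
  unfold Pre_count_ribbon_pieces; infer_instance

def pvWitness_count_ribbon_pieces : List Int × Int := ([2, 3], 7)

def Spec_count_ribbon_pieces (ribbonLengths : List Int) (total : Int) (out : Int) : Prop := out = count_ribbon_pieces_alt ribbonLengths total
instance (ribbonLengths : List Int) (total : Int) (out : Int) : Decidable (Spec_count_ribbon_pieces ribbonLengths total out) := by unfold Spec_count_ribbon_pieces; infer_instance

-- ===== CLAIM (what is proved, stated in full; the proofs are below) =====
def Claim_equal_count_ribbon_pieces : Prop := ∀ (ribbonLengths : List Int) (total : Int), Dom_count_ribbon_pieces ribbonLengths total → Pre_count_ribbon_pieces ribbonLengths total → Spec_count_ribbon_pieces ribbonLengths total (count_ribbon_pieces ribbonLengths total)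

-- ===== LEMMAS AND PROOFS =====

-- `pvReach ls t k`: t is the sum of k pieces, each piece a member of ls.
def pvReach (ls : List Int) (t : Int) (k : Nat) : Prop :=
  ∃ c : List Int, (∀ x ∈ c, x ∈ ls) ∧ c.sum = t ∧ c.length = k

-- `pvGood ls t v`: the cell value v is THE answer for amount t over piece set ls:
-- none = t unreachable, some m = m is the greatest piece count reaching t.
def pvGood (ls : List Int) (t : Int) (v : Option Int) : Prop :=
  match v with
  | none => ∀ k, ¬ pvReach ls t k
  | some m => 0 ≤ m ∧ pvReach ls t m.toNat ∧ ∀ k, pvReach ls t k → (k : Int) ≤ m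

-- `pvReachVia ls p t k`: t is reached by k pieces whose FIRST piece is drawn from p (B's inner
-- scan has processed exactly the lengths in p) and whose remainder is any ls-sum.
def pvReachVia (ls p : List Int) (t : Int) (k : Nat) : Prop :=
  ∃ L ∈ p, ∃ k', pvReach ls (t - L) k' ∧ k = k' + 1

def pvGoodVia (ls p : List Int) (t : Int) (v : Option Int) : Prop :=
  match v with
  | none => ∀ k, ¬ pvReachVia ls p t k
  | some m => 0 ≤ m ∧ pvReachVia ls p t m.toNat ∧ ∀ k, pvReachVia ls p t k → (k : Int) ≤ m

-- value computed for cell t by B's body (w = dp[t-L], cur = dp[t])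
def pvStepB (t L : Int) (w cur : Option Int) : Option Int :=
  if L ≤ t then
    match w with
    | none => cur
    | some prev =>
      match cur with
      | none => some (prev + 1)
      | some c => if c < prev + 1 then some (prev + 1) else some c
  else cur

-- value computed for cell (i,t) by A's body (v0 = the carried-down dp[i-1][t], w = dp[i][t-L])
def pvStepA (t L : Int) (v0 w : Option Int) : Option Int :=
  if L ≤ t ∧ w ≠ none then pvOptMax v0 (w.map (· + 1)) else v0

theorem pv_sum_ge_length (c : List Int) (h : ∀ x ∈ c, 1 ≤ x) : (c.length : Int) ≤ c.sum := by
  induction c with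
  | nil => simp
  | cons x xs ih =>
    have hx := h x (by simp)
    have hxs := ih (fun y hy => h y (by simp [hy]))
    simp only [List.sum_cons, List.length_cons]
    push_cast
    omega

theorem pvReach_le {ls : List Int} (hpos : ∀ x ∈ ls, 1 ≤ x) {t : Int} {k : Nat}
    (h : pvReach ls t k) : (k : Int) ≤ t := by
  obtain ⟨c, hc, hsum, hlen⟩ := h
  have := pv_sum_ge_length c (fun x hx => hpos x (hc x hx))
  omega

theorem pvReach_zero (ls : List Int) : pvReach ls 0 0 := ⟨[], by simp, by simp, rfl⟩

theorem pvGood_zero {ls : List Int} (hpos : ∀ x ∈ ls, 1 ≤ x) : pvGood ls 0 (some 0) := by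
  refine ⟨le_refl 0, ?_, ?_⟩
  · exact pvReach_zero ls
  · intro k hk
    exact pvReach_le hpos hk

theorem pvGood_nil {t : Int} (ht : t ≠ 0) : pvGood [] t none := by
  intro k hk
  obtain ⟨c, hc, hsum, hlen⟩ := hk
  have hc0 : c = [] := by
    cases c with
    | nil => rfl
    | cons a tl => exact absurd (hc a (by simp)) (by simp)
  subst hc0
  simp at hsum
  exact ht hsum.symm

theorem pvGood_unique {ls : List Int} {t : Int} {v w : Option Int}
    (hv : pvGood ls t v) (hw : pvGood ls t w) : v = w := by
  cases v with
  | none =>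
    cases w with
    | none => rfl
    | some m => exact absurd hw.2.1 (hv m.toNat)
  | some m =>
    cases w with
    | none => exact absurd hv.2.1 (hw m.toNat)
    | some m' =>
      have h1 := hv.2.2 _ hw.2.1
      have h2 := hw.2.2 _ hv.2.1
      have := hv.1; have := hw.1
      congr 1
      omega

theorem pvReach_mono_append {p : List Int} {L t : Int} {k : Nat}
    (h : pvReach p t k) : pvReach (p ++ [L]) t k := by
  obtain ⟨c, hc, hsum, hlen⟩ := h
  exact ⟨c, fun x hx => List.mem_append_left _ (hc x hx), hsum, hlen⟩

theorem pvReach_append_singleton {p : List Int} {L t : Int} {k : Nat}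
    (hq : ∀ x ∈ p ++ [L], 1 ≤ x) (h : pvReach (p ++ [L]) t k) :
    pvReach p t k ∨ (L ≤ t ∧ 1 ≤ k ∧ pvReach (p ++ [L]) (t - L) (k - 1)) := by
  obtain ⟨c, hc, hsum, hlen⟩ := h
  by_cases hall : ∀ x ∈ c, x ∈ p
  · exact Or.inl ⟨c, hall, hsum, hlen⟩
  · right
    simp only [not_forall] at hall
    obtain ⟨x, hxc, hxp⟩ := hall
    have hxL : x = L := by
      have := hc x hxc
      simp only [List.mem_append, List.mem_singleton] at this
      tauto
    have hLc : L ∈ c := hxL ▸ hxc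
    have hsum' : L + (c.erase L).sum = c.sum := List.sum_erase hLc
    have hlen' : (c.erase L).length = c.length - 1 := by
      rw [List.length_erase]; simp [hLc]
    have hk : 1 ≤ k := by
      have : c ≠ [] := by rintro rfl; simp at hLc
      have : 0 < c.length := List.length_pos_iff.mpr this
      omega
    have hge := pv_sum_ge_length (c.erase L)
      (fun y hy => hq y (hc y (List.mem_of_mem_erase hy)))
    refine ⟨by omega, hk, c.erase L,
      fun y hy => hc y (List.mem_of_mem_erase hy), by omega, by omega⟩

theorem pvStepA_good {p : List Int} {L t : Int} {v0 w : Option Int}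
    (hq : ∀ x ∈ p ++ [L], 1 ≤ x) (_ht : 1 ≤ t)
    (h0 : pvGood p t v0) (hw : L ≤ t → pvGood (p ++ [L]) (t - L) w) :
    pvGood (p ++ [L]) t (pvStepA t L v0 w) := by
  by_cases hg : L ≤ t ∧ w ≠ none
  · obtain ⟨hLt, hwne⟩ := hg
    have hw' := hw hLt
    simp only [pvStepA]
    rw [if_pos ⟨hLt, hwne⟩]
    cases w with
    | none => exact absurd rfl hwne
    | some mw =>
      obtain ⟨hmw0, hmwr, hmwmax⟩ := hw'
      have hreachL : pvReach (p ++ [L]) t (mw.toNat + 1) := by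
        obtain ⟨c, hc, hsum, hlen⟩ := hmwr
        refine ⟨L :: c, ?_, by simp [hsum], by simp [hlen]⟩
        intro x hx
        rcases List.mem_cons.mp hx with rfl | hx
        · exact List.mem_append_right _ (by simp)
        · exact hc x hx
      have htn : (mw + 1).toNat = mw.toNat + 1 := by omega
      cases v0 with
      | none =>
        show pvGood (p ++ [L]) t (some (mw + 1))
        refine ⟨by omega, ?_, fun k hk => ?_⟩
        · show pvReach (p ++ [L]) t (mw + 1).toNat
          rw [htn]; exact hreachL
        · rcases pvReach_append_singleton hq hk with hk' | ⟨_, hk1, hk2⟩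
          · exact absurd hk' (h0 k)
          · have := hmwmax _ hk2; omega
      | some m0 =>
        obtain ⟨h00, h0r, h0max⟩ := h0
        show pvGood (p ++ [L]) t (some (max m0 (mw + 1)))
        refine ⟨by omega, ?_, fun k hk => ?_⟩
        · rcases max_choice m0 (mw + 1) with h | h <;> rw [h]
          · exact pvReach_mono_append h0r
          · rw [htn]; exact hreachL
        · rcases pvReach_append_singleton hq hk with hk' | ⟨_, hk1, hk2⟩
          · have := h0max _ hk'; have := le_max_left m0 (mw + 1); omega
          · have := hmwmax _ hk2; have := le_max_right m0 (mw + 1); omega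
  · simp only [pvStepA]
    rw [if_neg hg]
    have hdecp : ∀ k, pvReach (p ++ [L]) t k → pvReach p t k := by
      intro k hk
      rcases pvReach_append_singleton hq hk with hk' | ⟨hLt, hk1, hk2⟩
      · exact hk'
      · exfalso
        by_cases hLt' : L ≤ t
        · have hwnone : w = none := by
            by_contra hx; exact hg ⟨hLt', hx⟩
          have hwn := hw hLt'
          rw [hwnone] at hwn
          exact hwn _ hk2
        · exact hLt' hLt
    cases v0 with
    | none => exact fun k hk => h0 k (hdecp k hk)
    | some m0 =>
      exact ⟨h0.1, pvReach_mono_append h0.2.1, fun k hk => h0.2.2 k (hdecp k hk)⟩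

theorem pvStepB_good {ls p : List Int} {L t : Int} {cur w : Option Int}
    (hpos : ∀ x ∈ ls, 1 ≤ x) (hL : L ∈ ls) (_ht : 1 ≤ t)
    (hcur : pvGoodVia ls p t cur) (hw : L ≤ t → pvGood ls (t - L) w) :
    pvGoodVia ls (p ++ [L]) t (pvStepB t L w cur) := by
  have hmono : ∀ k, pvReachVia ls p t k → pvReachVia ls (p ++ [L]) t k := by
    rintro k ⟨L', hL', hk⟩
    exact ⟨L', List.mem_append_left _ hL', hk⟩
  have hdec : ∀ k, pvReachVia ls (p ++ [L]) t k →
      pvReachVia ls p t k ∨ ∃ k', pvReach ls (t - L) k' ∧ k = k' + 1 := by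
    rintro k ⟨L', hL', k', hk', rfl⟩
    rcases List.mem_append.mp hL' with h | h
    · exact Or.inl ⟨L', h, k', hk', rfl⟩
    · simp only [List.mem_singleton] at h
      subst h
      exact Or.inr ⟨k', hk', rfl⟩
  by_cases hLt : L ≤ t
  · have hw' := hw hLt
    simp only [pvStepB]
    rw [if_pos hLt]
    cases w with
    | none =>
      cases cur with
      | none =>
        intro k hk
        rcases hdec k hk with h | ⟨k', hk', _⟩
        · exact hcur k h
        · exact hw' k' hk'
      | some c =>
        refine ⟨hcur.1, hmono _ hcur.2.1, fun k hk => ?_⟩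
        rcases hdec k hk with h | ⟨k', hk', rfl⟩
        · exact hcur.2.2 k h
        · exact absurd hk' (hw' k')
    | some prev =>
      obtain ⟨hp0, hpr, hpmax⟩ := hw'
      have hRL : pvReachVia ls (p ++ [L]) t (prev.toNat + 1) :=
        ⟨L, List.mem_append_right _ (by simp), prev.toNat, hpr, rfl⟩
      have htn : (prev + 1).toNat = prev.toNat + 1 := by omega
      cases cur with
      | none =>
        show pvGoodVia ls (p ++ [L]) t (some (prev + 1))
        refine ⟨by omega, ?_, fun k hk => ?_⟩
        · show pvReachVia ls (p ++ [L]) t (prev + 1).toNat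
          rw [htn]; exact hRL
        · rcases hdec k hk with h | ⟨k', hk', rfl⟩
          · exact absurd h (hcur k)
          · have := hpmax _ hk'; omega
      | some c =>
        obtain ⟨hc0, hcr, hcmax⟩ := hcur
        show pvGoodVia ls (p ++ [L]) t (if c < prev + 1 then some (prev + 1) else some c)
        by_cases hlt : c < prev + 1
        · rw [if_pos hlt]
          refine ⟨by omega, ?_, fun k hk => ?_⟩
          · show pvReachVia ls (p ++ [L]) t (prev + 1).toNat
            rw [htn]; exact hRL
          · rcases hdec k hk with h | ⟨k', hk', rfl⟩
            · have := hcmax k h; omega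
            · have := hpmax _ hk'; omega
        · rw [if_neg hlt]
          refine ⟨hc0, hmono _ hcr, fun k hk => ?_⟩
          rcases hdec k hk with h | ⟨k', hk', rfl⟩
          · exact hcmax k h
          · have := hpmax _ hk'; omega
  · simp only [pvStepB]
    rw [if_neg hLt]
    have hnoR : ∀ k', ¬ pvReach ls (t - L) k' := by
      intro k' hk'
      have := pvReach_le hpos hk'
      omega
    cases cur with
    | none =>
      intro k hk
      rcases hdec k hk with h | ⟨k', hk', _⟩
      · exact hcur k h
      · exact hnoR k' hk'
    | some c =>
      refine ⟨hcur.1, hmono _ hcur.2.1, fun k hk => ?_⟩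
      rcases hdec k hk with h | ⟨k', hk', rfl⟩
      · exact hcur.2.2 k h
      · exact absurd hk' (hnoR k')

theorem pvVia_bridge {ls : List Int} {t : Int} {k : Nat}
    (ht : 1 ≤ t) : pvReachVia ls ls t k ↔ pvReach ls t k := by
  constructor
  · rintro ⟨L, hL, k', ⟨c, hc, hsum, hlen⟩, rfl⟩
    refine ⟨L :: c, ?_, by simp [hsum], by simp [hlen]⟩
    intro x hx
    rcases List.mem_cons.mp hx with rfl | hx
    · exact hL
    · exact hc x hx
  · rintro ⟨c, hc, hsum, hlen⟩
    cases c with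
    | nil => simp at hsum; omega
    | cons x c' =>
      refine ⟨x, hc x (by simp), c'.length,
        ⟨c', fun y hy => hc y (by simp [hy]), by simp at hsum; omega, rfl⟩, by simp at hlen; omega⟩

theorem pvGoodVia_full {ls : List Int} {t : Int} {v : Option Int}
    (ht : 1 ≤ t) (h : pvGoodVia ls ls t v) : pvGood ls t v := by
  cases v with
  | none => exact fun k hk => h k ((pvVia_bridge ht).mpr hk)
  | some m =>
    exact ⟨h.1, (pvVia_bridge ht).mp h.2.1, fun k hk => h.2.2 k ((pvVia_bridge ht).mpr hk)⟩

theorem pvGoodVia_nil {ls : List Int} {t : Int} : pvGoodVia ls [] t none := by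
  rintro k ⟨L, hL, _⟩
  simp at hL

theorem pv_getD_set_self {α : Type} (xs : List α) (i : Nat) (v d : α) (h : i < xs.length) :
    (xs.set i v).getD i d = v := by
  simp [List.getD_eq_getElem?_getD, List.getElem?_set_self h]

theorem pv_getD_set_ne {α : Type} (xs : List α) {i j : Nat} (v d : α) (h : i ≠ j) :
    (xs.set i v).getD j d = xs.getD j d := by
  simp [List.getD_eq_getElem?_getD, List.getElem?_set_ne h]

theorem pvBodyB_length (dp : List (Option Int)) (t L : Int) :
    (pvBodyB t dp L).length = dp.length := by
  unfold pvBodyB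
  repeat' split
  all_goals simp [List.length_set]

theorem pvBodyB_getElem_ne (dp : List (Option Int)) (t L : Int) (u : Nat) (hu : u ≠ t.toNat) :
    (pvBodyB t dp L)[u]? = dp[u]? := by
  unfold pvBodyB
  repeat' split
  all_goals simp [List.getElem?_set_ne (Ne.symm hu)]

theorem pvBodyB_at (dp : List (Option Int)) (t L : Int) (h0 : 0 ≤ t) (ht : t.toNat < dp.length) :
    (pvBodyB t dp L).getD t.toNat none =
      pvStepB t L ((PySem.List.pyGet? dp (t - L)).getD none) (dp.getD t.toNat none) := by
  have hcur : (PySem.List.pyGet? dp t).getD none = dp.getD t.toNat none := by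
    rw [PySem.List.pyGet?_of_nonneg dp h0, List.getD_eq_getElem?_getD]
  unfold pvBodyB pvStepB
  rw [hcur]
  by_cases hLt : L ≤ t
  · rw [if_pos hLt, if_pos hLt]
    cases hw : (PySem.List.pyGet? dp (t - L)).getD none with
    | none => rfl
    | some prev =>
      cases hc : dp.getD t.toNat none with
      | none =>
        show (dp.set t.toNat (some (prev + 1))).getD t.toNat none = some (prev + 1)
        exact pv_getD_set_self _ _ _ _ ht
      | some c =>
        show (if c < prev + 1 then dp.set t.toNat (some (prev + 1)) else dp).getD t.toNat none =
          (if c < prev + 1 then some (prev + 1) else some c)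
        by_cases hlt : c < prev + 1
        · rw [if_pos hlt, if_pos hlt]
          exact pv_getD_set_self _ _ _ _ ht
        · rw [if_neg hlt, if_neg hlt]
          exact hc
  · rw [if_neg hLt, if_neg hLt]

theorem pvInnerB_go (ls : List Int) (hpos : ∀ x ∈ ls, 1 ≤ x) (t : Int) (ht : 1 ≤ t)
    (base : List (Option Int)) (S : Nat) (_hbl : base.length = S) (htS : t.toNat < S)
    (hgood : ∀ u : Nat, u < S → (u : Int) < t → pvGood ls u (base.getD u none)) :
    ∀ (q p : List Int), p ++ q = ls →
      ∀ dp : List (Option Int), dp.length = S →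
        (∀ u : Nat, u ≠ t.toNat → dp[u]? = base[u]?) →
        pvGoodVia ls p t (dp.getD t.toNat none) →
        (q.foldl (fun dp L => pvBodyB t dp L) dp).length = S ∧
        (∀ u : Nat, u ≠ t.toNat → (q.foldl (fun dp L => pvBodyB t dp L) dp)[u]? = base[u]?) ∧
        pvGoodVia ls ls t ((q.foldl (fun dp L => pvBodyB t dp L) dp).getD t.toNat none) := by
  intro q
  induction q with
  | nil =>
    intro p hpq dp hlen hoth hcur
    have hp : p = ls := by simpa using hpq
    subst hp
    exact ⟨hlen, hoth, hcur⟩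
  | cons L q' ih =>
    intro p hpq dp hlen hoth hcur
    have hLls : L ∈ ls := by rw [← hpq]; simp
    have hL1 : 1 ≤ L := hpos L hLls
    simp only [List.foldl_cons]
    apply ih (p ++ [L]) (by simpa using hpq)
    · rw [pvBodyB_length, hlen]
    · intro u hu
      rw [pvBodyB_getElem_ne dp t L u hu]
      exact hoth u hu
    · rw [pvBodyB_at dp t L (by omega) (by omega)]
      apply pvStepB_good hpos hLls ht hcur
      intro hLt
      have h1 : (0:Int) ≤ t - L := by omega
      have hval : (PySem.List.pyGet? dp (t - L)).getD none = base.getD (t - L).toNat none := by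
        rw [PySem.List.pyGet?_of_nonneg dp h1, List.getD_eq_getElem?_getD,
          hoth (t - L).toNat (by omega), ← List.getD_eq_getElem?_getD]
      rw [hval]
      have h2 := hgood (t - L).toNat (by omega) (by omega)
      rwa [Int.toNat_of_nonneg h1] at h2

-- the 1D array after the first M rounds of B's outer loop
def pvDpB (ls : List Int) (total : Int) (M : Nat) : List (Option Int) :=
  (List.range M).foldl (fun dp (k : Nat) => ls.foldl (fun dp L => pvBodyB (1 + (k : Int)) dp L) dp)
    ((List.replicate (total + 1).toNat (none : Option Int)).set 0 (some 0))

theorem pvDpB_succ (ls : List Int) (total : Int) (M : Nat) :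
    pvDpB ls total (M + 1) = ls.foldl (fun dp L => pvBodyB (1 + (M : Int)) dp L) (pvDpB ls total M) := by
  unfold pvDpB
  rw [List.range_succ, List.foldl_append]
  simp

theorem pvOuterB (ls : List Int) (total : Int) (hpos : ∀ x ∈ ls, 1 ≤ x) (h0 : 0 ≤ total) :
    ∀ M : Nat, M ≤ total.toNat →
      (pvDpB ls total M).length = (total + 1).toNat ∧
      ∀ u : Nat, u < (total + 1).toNat →
        (u ≤ M → pvGood ls u ((pvDpB ls total M).getD u none)) ∧
        (M < u → (pvDpB ls total M).getD u none = none) := by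
  intro M
  induction M with
  | zero =>
    intro _
    refine ⟨by unfold pvDpB; simp, fun u hu => ⟨?_, ?_⟩⟩
    · intro hu0
      have hu00 : u = 0 := by omega
      subst hu00
      unfold pvDpB
      simp only [List.range_zero, List.foldl_nil]
      rw [pv_getD_set_self _ 0 _ _ (by simp; omega)]
      simpa using pvGood_zero hpos
    · intro hu0
      unfold pvDpB
      simp only [List.range_zero, List.foldl_nil]
      rw [pv_getD_set_ne _ _ _ (by omega : (0:Nat) ≠ u)]
      rw [List.getD_eq_getElem?_getD, List.getElem?_replicate]
      split <;> rfl
  | succ M ih =>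
    intro hM1
    have hM : M ≤ total.toNat := by omega
    obtain ⟨ihlen, ihinv⟩ := ih hM
    rw [pvDpB_succ]
    have ht : (1:Int) ≤ 1 + (M:Int) := by omega
    have htn : (1 + (M:Int)).toNat = M + 1 := by omega
    have hgoodb : ∀ u : Nat, u < (total + 1).toNat → (u:Int) < 1 + (M:Int) →
        pvGood ls u ((pvDpB ls total M).getD u none) := by
      intro u hu hlt
      exact (ihinv u hu).1 (by omega)
    have hcurb : pvGoodVia ls [] (1 + (M:Int)) ((pvDpB ls total M).getD (1 + (M:Int)).toNat none) := by
      rw [htn, (ihinv (M+1) (by omega)).2 (by omega)]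
      exact pvGoodVia_nil
    obtain ⟨hlen2, hoth2, hgood2⟩ :=
      pvInnerB_go ls hpos (1 + (M:Int)) ht (pvDpB ls total M) (total + 1).toNat ihlen
        (by omega) hgoodb ls [] (by simp) (pvDpB ls total M) ihlen (fun u hu => rfl) hcurb
    refine ⟨hlen2, fun u hu => ⟨?_, ?_⟩⟩
    · intro huM
      by_cases hueq : u = M + 1
      · subst hueq
        have hg := pvGoodVia_full ht hgood2
        rw [htn] at hg
        have hcast : ((M + 1 : Nat) : Int) = 1 + (M : Int) := by push_cast; omega
        rw [hcast]
        exact hg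
      · have hne : u ≠ (1 + (M:Int)).toNat := by omega
        rw [List.getD_eq_getElem?_getD, hoth2 u hne, ← List.getD_eq_getElem?_getD]
        exact (ihinv u hu).1 (by omega)
    · intro hu1
      have hne : u ≠ (1 + (M:Int)).toNat := by omega
      rw [List.getD_eq_getElem?_getD, hoth2 u hne, ← List.getD_eq_getElem?_getD]
      exact (ihinv u hu).2 (by omega)

theorem pvAltB_eq (ls : List Int) (total : Int) (h0 : 0 ≤ total) :
    count_ribbon_pieces_alt ls total =
      match (pvDpB ls total total.toNat).getD total.toNat none with
      | none => -1
      | some v => v := by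
  unfold count_ribbon_pieces_alt pvDpB
  have h1 : ((total + 1) - 1).toNat = total.toNat := by omega
  simp only [PySem.List.pyRange_one, h1, List.foldl_map,
    PySem.List.pyGet?_of_nonneg _ h0, ← List.getD_eq_getElem?_getD]

theorem pvCellA_eq (dp : List (List (Option Int))) (i : Nat) (t : Int) (ht : 0 ≤ t) :
    pvCellA dp i t = (dp.getD i []).getD t.toNat none := by
  unfold pvCellA
  rw [PySem.List.pyGet?_of_nonneg _ ht, List.getD_eq_getElem?_getD,
    List.getD_eq_getElem?_getD]

theorem pvInitA_length : ∀ (m : Nat) (dp : List (List (Option Int))),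
    ((List.range m).foldl (fun dp i => pvSetCellA dp i 0 (some 0)) dp).length = dp.length := by
  intro m
  induction m with
  | zero => intro dp; rfl
  | succ m ih =>
    intro dp
    rw [List.range_succ, List.foldl_append]
    simp only [List.foldl_cons, List.foldl_nil]
    rw [pvSetCellA, List.length_set, ih]

theorem pvInitA_getD : ∀ (m : Nat) (dp : List (List (Option Int))) (j : Nat),
    ((List.range m).foldl (fun dp i => pvSetCellA dp i 0 (some 0)) dp).getD j [] =
      if j < m ∧ j < dp.length then (dp.getD j []).set 0 (some 0) else dp.getD j [] := by
  intro m
  induction m with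
  | zero => intro dp j; simp
  | succ m ih =>
    intro dp j
    rw [List.range_succ, List.foldl_append]
    simp only [List.foldl_cons, List.foldl_nil]
    by_cases hj : j = m
    · subst hj
      by_cases hlen : j < dp.length
      · rw [pvSetCellA, pv_getD_set_self _ _ _ _ (by rw [pvInitA_length]; exact hlen)]
        rw [ih dp j, if_neg (by omega), if_pos ⟨by omega, hlen⟩]
        rfl
      · rw [pvSetCellA, List.set_eq_of_length_le (by rw [pvInitA_length]; omega)]
        rw [ih dp j, if_neg (by omega), if_neg (by omega)]
    · rw [pvSetCellA, pv_getD_set_ne _ _ _ (fun h => hj h.symm), ih dp j]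
      split_ifs <;> first | rfl | omega

theorem pvBodyA_spec (ls : List Int) (i : Nat) (dp : List (List (Option Int))) (t : Int)
    (hi : i < ls.length) (hidp : i < dp.length) (ht1 : 1 ≤ t)
    (hL1 : 1 ≤ ls[i]) (hrow : t.toNat < (dp.getD i []).length) :
    (pvBodyA ls i dp t).length = dp.length ∧
    (∀ j : Nat, j ≠ i → (pvBodyA ls i dp t).getD j [] = dp.getD j []) ∧
    ((pvBodyA ls i dp t).getD i []).length = (dp.getD i []).length ∧
    (∀ u : Nat, u ≠ t.toNat → ((pvBodyA ls i dp t).getD i []).getD u none = (dp.getD i []).getD u none) ∧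
    ((pvBodyA ls i dp t).getD i []).getD t.toNat none =
      pvStepA t ls[i]
        (if 0 < i then (dp.getD (i - 1) []).getD t.toNat none else (dp.getD i []).getD t.toNat none)
        ((dp.getD i []).getD (t - ls[i]).toNat none) := by
  have ht0 : (0:Int) ≤ t := by omega
  have hLval : (PySem.List.pyGet? ls (Int.ofNat i)).getD 0 = ls[i] := by
    rw [show (Int.ofNat i) = ((i : Nat) : Int) from rfl, PySem.List.pyGet?_ofNat ls i hi]
    rfl
  simp only [pvBodyA, hLval]
  set D := if 0 < i then pvSetCellA dp i t (pvCellA dp (i - 1) t) else dp with hD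
  have hDlen : D.length = dp.length := by
    rw [hD]; split
    · rw [pvSetCellA, List.length_set]
    · rfl
  have hDrow_ne : ∀ j : Nat, j ≠ i → D.getD j [] = dp.getD j [] := by
    intro j hj
    rw [hD]; split
    · rw [pvSetCellA]; exact pv_getD_set_ne _ _ _ (fun h => hj h.symm)
    · rfl
  have hv0 : pvCellA dp (i - 1) t = (dp.getD (i - 1) []).getD t.toNat none :=
    pvCellA_eq _ _ _ ht0
  have hDrowi : D.getD i [] =
      if 0 < i then (dp.getD i []).set t.toNat ((dp.getD (i - 1) []).getD t.toNat none)
      else dp.getD i [] := by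
    rw [hD]
    split
    · rw [pvSetCellA, pv_getD_set_self _ _ _ _ hidp, hv0]
    · rfl
  have hDrowi_len : (D.getD i []).length = (dp.getD i []).length := by
    rw [hDrowi]; split <;> simp
  have hDrowi_t : (D.getD i []).getD t.toNat none =
      (if 0 < i then (dp.getD (i - 1) []).getD t.toNat none else (dp.getD i []).getD t.toNat none) := by
    rw [hDrowi]
    split
    · exact pv_getD_set_self _ _ _ _ hrow
    · rfl
  have hDrowi_ne : ∀ u : Nat, u ≠ t.toNat → (D.getD i []).getD u none = (dp.getD i []).getD u none := by
    intro u hu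
    rw [hDrowi]
    split
    · exact pv_getD_set_ne _ _ _ (Ne.symm hu)
    · rfl
  have hcurD : pvCellA D i t =
      (if 0 < i then (dp.getD (i - 1) []).getD t.toNat none else (dp.getD i []).getD t.toNat none) := by
    rw [pvCellA_eq _ _ _ ht0, hDrowi_t]
  set w0 := (dp.getD i []).getD (t - ls[i]).toNat none with hwdef
  set v0 := (if 0 < i then (dp.getD (i - 1) []).getD t.toNat none
    else (dp.getD i []).getD t.toNat none) with hv0def
  by_cases hLt : ls[i] ≤ t
  · have hw : pvCellA D i (t - ls[i]) = w0 := by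
      rw [pvCellA_eq _ _ _ (by omega), hDrowi_ne _ (by omega), ← hwdef]
    rw [hw, hcurD]
    by_cases hwn : w0 = none
    · rw [if_neg (fun h => h.2 hwn)]
      refine ⟨hDlen, hDrow_ne, hDrowi_len, hDrowi_ne, ?_⟩
      rw [hDrowi_t]
      simp only [pvStepA]
      rw [if_neg (fun h => h.2 hwn)]
    · rw [if_pos ⟨hLt, hwn⟩]
      have hrowD : t.toNat < (D.getD i []).length := by rw [hDrowi_len]; exact hrow
      refine ⟨?_, ?_, ?_, ?_, ?_⟩
      · rw [pvSetCellA, List.length_set, hDlen]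
      · intro j hj
        rw [pvSetCellA, pv_getD_set_ne _ _ _ (fun h => hj h.symm)]
        exact hDrow_ne j hj
      · rw [pvSetCellA, pv_getD_set_self _ _ _ _ (by rw [hDlen]; exact hidp)]
        rw [List.length_set, hDrowi_len]
      · intro u hu
        rw [pvSetCellA, pv_getD_set_self _ _ _ _ (by rw [hDlen]; exact hidp)]
        rw [pv_getD_set_ne _ _ _ (Ne.symm hu)]
        exact hDrowi_ne u hu
      · rw [pvSetCellA, pv_getD_set_self _ _ _ _ (by rw [hDlen]; exact hidp)]
        rw [pv_getD_set_self _ _ _ _ hrowD]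
        simp only [pvStepA]
        rw [if_pos ⟨hLt, hwn⟩]
  · simp only [pvStepA]
    rw [if_neg (fun h => hLt h.1), if_neg (fun h => hLt h.1)]
    exact ⟨hDlen, hDrow_ne, hDrowi_len, hDrowi_ne, hDrowi_t⟩

def pvRow0 (total : Int) : List (Option Int) :=
  (List.replicate (total + 1).toNat (none : Option Int)).set 0 (some 0)

theorem pvRow0_length (total : Int) : (pvRow0 total).length = (total + 1).toNat := by
  unfold pvRow0; simp

theorem pvRow0_getD (total : Int) (u : Nat) (hu : u < (total + 1).toNat) :
    (pvRow0 total).getD u none = if u = 0 then some 0 else none := by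
  unfold pvRow0
  by_cases h : u = 0
  · subst h
    rw [if_pos rfl, pv_getD_set_self _ _ _ _ (by simp; omega)]
  · rw [if_neg h, pv_getD_set_ne _ _ _ (fun hh => h hh.symm)]
    rw [List.getD_eq_getElem?_getD, List.getElem?_replicate]
    split <;> rfl

-- the invariant of A's row-i inner loop after M rounds
def pvInvA (ls : List Int) (total : Int) (i M : Nat) (dp : List (List (Option Int))) : Prop :=
  dp.length = ls.length ∧
  (∀ j : Nat, j < ls.length → (dp.getD j []).length = (total + 1).toNat) ∧
  (∀ j : Nat, j < i → ∀ u : Nat, u < (total + 1).toNat →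
    pvGood (ls.take (j + 1)) u ((dp.getD j []).getD u none)) ∧
  (∀ j : Nat, i < j → j < ls.length → dp.getD j [] = pvRow0 total) ∧
  (∀ u : Nat, u < (total + 1).toNat →
    (u ≤ M → pvGood (ls.take (i + 1)) u ((dp.getD i []).getD u none)) ∧
    (M < u → (dp.getD i []).getD u none = none))

theorem pvRoundA (ls : List Int) (total : Int) (hpos : ∀ x ∈ ls, 1 ≤ x) (h0 : 0 ≤ total)
    (i M : Nat) (hi : i < ls.length) (hM : M < total.toNat)
    (dp : List (List (Option Int))) (hinv : pvInvA ls total i M dp) :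
    pvInvA ls total i (M + 1) (pvBodyA ls i dp (1 + (M : Int))) := by
  obtain ⟨hlen, hrowlen, hprev, hnext, hrow⟩ := hinv
  have ht1 : (1:Int) ≤ 1 + (M:Int) := by omega
  have htn : ((1:Int) + (M:Int)).toNat = M + 1 := by omega
  have hL1 : 1 ≤ ls[i] := hpos _ (List.getElem_mem hi)
  obtain ⟨blen, brow_ne, browi_len, browi_ne, browi_t⟩ :=
    pvBodyA_spec ls i dp (1 + (M:Int)) hi (by omega) ht1 hL1 (by rw [hrowlen i hi]; omega)
  refine ⟨by rw [blen, hlen], ?_, ?_, ?_, ?_⟩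
  · intro j hj
    by_cases hji : j = i
    · subst hji; rw [browi_len]; exact hrowlen j hj
    · rw [brow_ne j hji]; exact hrowlen j hj
  · intro j hj u hu
    rw [brow_ne j (by omega)]
    exact hprev j hj u hu
  · intro j hj1 hj2
    rw [brow_ne j (by omega)]
    exact hnext j hj1 hj2
  · intro u hu
    constructor
    · intro huM
      by_cases hut : u = M + 1
      · subst hut
        rw [htn] at browi_t
        rw [browi_t]
        have hcast : ((M + 1 : Nat) : Int) = 1 + (M : Int) := by push_cast; omega
        rw [hcast]
        have hq : ls.take (i + 1) = ls.take i ++ [ls[i]] := by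
          rw [List.take_add_one, List.getElem?_eq_getElem hi]
          rfl
        rw [hq]
        apply pvStepA_good
        · intro x hx
          rw [← hq] at hx
          exact hpos x (List.mem_of_mem_take hx)
        · exact ht1
        · by_cases hip : 0 < i
          · rw [if_pos hip]
            have hgp := hprev (i - 1) (by omega) (M + 1) (by omega)
            rw [show i - 1 + 1 = i from by omega] at hgp
            rwa [hcast] at hgp
          · rw [if_neg hip]
            rw [(hrow (M + 1) (by omega)).2 (by omega)]
            rw [show i = 0 from by omega, List.take_zero]
            exact pvGood_nil (by omega)
        · intro hLt
          have h1 : (0:Int) ≤ 1 + (M:Int) - ls[i] := by omega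
          have hwg := (hrow ((1 + (M:Int)) - ls[i]).toNat (by omega)).1 (by omega)
          rw [Int.toNat_of_nonneg h1, hq] at hwg
          exact hwg
      · rw [browi_ne u (by omega)]
        exact (hrow u hu).1 (by omega)
    · intro hu1
      rw [browi_ne u (by omega)]
      exact (hrow u hu).2 (by omega)

-- row i of A after the first M rounds
def pvRowsA (ls : List Int) (i : Nat) (dpS : List (List (Option Int))) (M : Nat) : List (List (Option Int)) :=
  (List.range M).foldl (fun dp (k : Nat) => pvBodyA ls i dp (1 + (k : Int))) dpS

theorem pvRowsA_succ (ls : List Int) (i : Nat) (dpS : List (List (Option Int))) (M : Nat) :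
    pvRowsA ls i dpS (M + 1) = pvBodyA ls i (pvRowsA ls i dpS M) (1 + (M : Int)) := by
  unfold pvRowsA
  rw [List.range_succ, List.foldl_append]
  simp

theorem pvRowsA_inv (ls : List Int) (total : Int) (hpos : ∀ x ∈ ls, 1 ≤ x) (h0 : 0 ≤ total)
    (i : Nat) (hi : i < ls.length) (dpS : List (List (Option Int)))
    (hS : pvInvA ls total i 0 dpS) :
    ∀ M : Nat, M ≤ total.toNat → pvInvA ls total i M (pvRowsA ls i dpS M) := by
  intro M
  induction M with
  | zero => intro _; exact hS
  | succ M ih =>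
    intro hM1
    rw [pvRowsA_succ]
    exact pvRoundA ls total hpos h0 i M hi (by omega) _ (ih (by omega))

theorem pvInvA_init (ls : List Int) (total : Int) (hpos : ∀ x ∈ ls, 1 ≤ x) (_h0 : 0 ≤ total)
    (i : Nat) (hi : i < ls.length) (dp : List (List (Option Int)))
    (hlen : dp.length = ls.length)
    (hrowlen : ∀ j : Nat, j < ls.length → (dp.getD j []).length = (total + 1).toNat)
    (hprev : ∀ j : Nat, j < i → ∀ u : Nat, u < (total + 1).toNat →
      pvGood (ls.take (j + 1)) u ((dp.getD j []).getD u none))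
    (hnext : ∀ j : Nat, i ≤ j → j < ls.length → dp.getD j [] = pvRow0 total) :
    pvInvA ls total i 0 dp := by
  refine ⟨hlen, hrowlen, hprev, fun j hj1 hj2 => hnext j (by omega) hj2, fun u hu => ⟨?_, ?_⟩⟩
  · intro hu0
    have hu00 : u = 0 := by omega
    subst hu00
    rw [hnext i le_rfl hi, pvRow0_getD total 0 (by omega), if_pos rfl]
    show pvGood (ls.take (i + 1)) ((0:Nat) : Int) (some 0)
    rw [show ((0:Nat) : Int) = 0 from rfl]
    apply pvGood_zero
    intro x hx
    exact hpos x (List.mem_of_mem_take hx)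
  · intro hu0
    rw [hnext i le_rfl hi, pvRow0_getD total u hu, if_neg (by omega)]

def pvDpAinit (ls : List Int) (total : Int) : List (List (Option Int)) :=
  (List.range ls.length).foldl (fun dp i => pvSetCellA dp i 0 (some 0))
    (List.replicate ls.length (List.replicate (total + 1).toNat (none : Option Int)))

theorem pvDpAinit_length (ls : List Int) (total : Int) :
    (pvDpAinit ls total).length = ls.length := by
  unfold pvDpAinit
  rw [pvInitA_length]
  simp

theorem pvDpAinit_getD (ls : List Int) (total : Int) (j : Nat) (hj : j < ls.length) :
    (pvDpAinit ls total).getD j [] = pvRow0 total := by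
  unfold pvDpAinit pvRow0
  rw [pvInitA_getD, if_pos ⟨hj, by simpa using hj⟩]
  rw [List.getD_replicate _ hj]

-- the whole table of A after its first m rows have been processed
def pvDpAall (ls : List Int) (total : Int) (m : Nat) : List (List (Option Int)) :=
  (List.range m).foldl (fun dp (i : Nat) => pvRowsA ls i dp total.toNat) (pvDpAinit ls total)

theorem pvDpAall_inv (ls : List Int) (total : Int) (hpos : ∀ x ∈ ls, 1 ≤ x) (h0 : 0 ≤ total) :
    ∀ m : Nat, m ≤ ls.length →
      (pvDpAall ls total m).length = ls.length ∧
      (∀ j : Nat, j < ls.length → ((pvDpAall ls total m).getD j []).length = (total + 1).toNat) ∧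
      (∀ j : Nat, j < m → j < ls.length → ∀ u : Nat, u < (total + 1).toNat →
        pvGood (ls.take (j + 1)) u (((pvDpAall ls total m).getD j []).getD u none)) ∧
      (∀ j : Nat, m ≤ j → j < ls.length → (pvDpAall ls total m).getD j [] = pvRow0 total) := by
  intro m
  induction m with
  | zero =>
    intro _
    unfold pvDpAall
    simp only [List.range_zero, List.foldl_nil]
    refine ⟨pvDpAinit_length ls total, ?_, ?_, fun j hj1 hj2 => pvDpAinit_getD ls total j hj2⟩
    · intro j hj
      rw [pvDpAinit_getD ls total j hj, pvRow0_length]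
    · intro j hj
      exact absurd hj (Nat.not_lt_zero j)
  | succ m ih =>
    intro hm1
    obtain ⟨ihlen, ihrow, ihgood, ihinit⟩ := ih (by omega)
    have hsucc : pvDpAall ls total (m + 1) = pvRowsA ls m (pvDpAall ls total m) total.toNat := by
      unfold pvDpAall
      rw [List.range_succ, List.foldl_append]
      simp
    rw [hsucc]
    have hinv0 := pvInvA_init ls total hpos h0 m (by omega) _ ihlen ihrow
      (fun j hj u hu => ihgood j hj (by omega) u hu) ihinit
    obtain ⟨rlen, rrow, rprev, rnext, rcur⟩ :=
      pvRowsA_inv ls total hpos h0 m (by omega) _ hinv0 total.toNat le_rfl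
    refine ⟨rlen, rrow, ?_, fun j hj1 hj2 => rnext j (by omega) hj2⟩
    intro j hj hj2 u hu
    by_cases hjm : j = m
    · subst hjm
      exact (rcur u hu).1 (by omega)
    · exact rprev j (by omega) u hu

theorem pvA_eq (ls : List Int) (total : Int) (h0 : 0 ≤ total) :
    count_ribbon_pieces ls total =
      match ((pvDpAall ls total ls.length).getD (ls.length - 1) []).getD total.toNat none with
      | none => -1
      | some v => v := by
  unfold count_ribbon_pieces pvDpAall pvDpAinit pvRowsA
  have h1 : ((total + 1) - 1).toNat = total.toNat := by omega
  simp only [PySem.List.pyRange_one, h1, List.foldl_map, pvCellA_eq _ _ _ h0]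

theorem pv_foldl_id {α β : Type} (l : List β) (x : α) : l.foldl (fun a _ => a) x = x := by
  induction l generalizing x with
  | nil => rfl
  | cons y l ih => simp only [List.foldl_cons]; exact ih x

theorem count_ribbon_pieces_spec : Claim_equal_count_ribbon_pieces := by
  intro ls total hdom hpre
  obtain ⟨hne, h0, hcase⟩ := hpre
  unfold Spec_count_ribbon_pieces
  have hn1 : 0 < ls.length := List.length_pos_iff.mpr hne
  rcases hcase with h0t | hpos
  · subst h0t
    rw [pvA_eq ls 0 le_rfl, pvAltB_eq ls 0 le_rfl]
    have hzB : (pvDpB ls 0 (0:Int).toNat).getD (0:Int).toNat none = some 0 := by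
      show (pvDpB ls 0 0).getD 0 none = some 0
      unfold pvDpB
      simp only [List.range_zero, List.foldl_nil]
      exact pv_getD_set_self _ _ _ _ (by simp)
    have hid : ∀ (dp : List (List (Option Int))) (i : Nat), pvRowsA ls i dp (0:Int).toNat = dp :=
      fun _ _ => rfl
    have hzA : ((pvDpAall ls 0 ls.length).getD (ls.length - 1) []).getD (0:Int).toNat none = some 0 := by
      unfold pvDpAall
      simp only [hid]
      rw [pv_foldl_id]
      rw [pvDpAinit_getD ls 0 _ (by omega)]
      show (pvRow0 0).getD 0 none = some 0
      rw [pvRow0_getD 0 0 (by simp), if_pos rfl]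
    rw [hzA, hzB]
  · rw [pvA_eq ls total h0, pvAltB_eq ls total h0]
    obtain ⟨_, _, hgood, _⟩ := pvDpAall_inv ls total hpos h0 ls.length le_rfl
    have hSgt : total.toNat < (total + 1).toNat := by omega
    have hA := hgood (ls.length - 1) (by omega) (by omega) total.toNat hSgt
    rw [show ls.length - 1 + 1 = ls.length from by omega, List.take_length] at hA
    have hB := ((pvOuterB ls total hpos h0 total.toNat le_rfl).2 total.toNat hSgt).1 le_rfl
    rw [pvGood_unique hA hB]

-- ===== VERDICT (by name: the statement is the Claim_ definition above) =====
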